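-- pv_equiv track=rewrite | github.com/fengyh3/TSMSA | base_model/TSMSA/evaluate.py | find_boundry
-- ===== SOURCE A (Python) =====
-- def find_boundry(labels):
--     pairs = []
--     for label in labels:
--         flag = False
--         start = []
--         end = []
--         pair = []
--         for idx in range(len(label)):
--             if label[idx] == 'B':
--                 if flag:
--                     end.append(idx)
--                 start.append(idx)
--                 flag = True
--             elif flag and label[idx] != 'I':
--                 end.append(idx)
--                 flag = False
--         if flag:
--             end.append(len(label))
--         for s, e in zip(start, end):
--             pair.append((s, e))
--         pairs.append(pair)
--     return pairs
-- ===== SOURCE B (Python) =====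
-- def _end(label, j):
--     while j < len(label) and label[j] == 'I':
--         j += 1
--     return j
--
-- def find_boundry(labels):
--     return [[(i, _end(label, i + 1)) for i in range(len(label)) if label[i] == 'B']
--             for label in labels]
-- ===== Notes on version B (the rewrite author's own statement) =====
-- stated objective: simpler
-- what changed: Replaced A's flag state machine with parallel start/end lists zipped at the end by a direct comprehension that, at each 'B', extends forward over 'I's and emits the span immediately.
import Mathlib
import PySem

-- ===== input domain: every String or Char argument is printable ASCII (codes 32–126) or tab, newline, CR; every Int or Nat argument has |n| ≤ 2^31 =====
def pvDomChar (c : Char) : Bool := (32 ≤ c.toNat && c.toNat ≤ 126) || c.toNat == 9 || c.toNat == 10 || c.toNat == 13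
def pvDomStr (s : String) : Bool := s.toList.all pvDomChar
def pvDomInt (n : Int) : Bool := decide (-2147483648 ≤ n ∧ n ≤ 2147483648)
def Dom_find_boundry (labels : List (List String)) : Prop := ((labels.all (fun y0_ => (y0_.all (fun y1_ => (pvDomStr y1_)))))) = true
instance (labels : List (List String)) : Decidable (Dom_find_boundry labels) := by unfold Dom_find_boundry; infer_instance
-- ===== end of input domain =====

-- B replaces A's flag state machine (parallel start/end lists zipped at the end) by a
-- comprehension that extends each 'B' forward over 'I's and emits the span directly (simpler).

-- ===== PORT A =====
-- one sequence: flag/start/end state machine over the indices, then zip start end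
def findA_inner (xs : List String) : List (Int × Int) :=
  let n := xs.length
  let st := (List.range n).foldl
    (fun (st : Bool × List Int × List Int) idx =>
      let (flag, start, end_) := st
      if xs.getD idx "" = "B" then
        (true, start ++ [(idx : Int)], if flag then end_ ++ [(idx : Int)] else end_)
      else if flag ∧ xs.getD idx "" ≠ "I" then
        (false, start, end_ ++ [(idx : Int)])
      else st)
    (false, [], [])
  let end2 := if st.1 then st.2.2 ++ [(n : Int)] else st.2.2
  st.2.1.zip end2

def find_boundry (labels : List (List String)) : List (List (Int × Int)) :=
  labels.foldl (fun pairs label => pairs ++ [findA_inner label]) []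

-- ===== PORT B =====
-- the while loop of Source B's helper _end
def extEnd (xs : List String) (j : Nat) : Nat :=
  if h : j < xs.length ∧ xs.getD j "" = "I" then extEnd xs (j + 1) else j
termination_by xs.length - j
decreasing_by omega

def findB_inner (xs : List String) : List (Int × Int) :=
  (List.range xs.length).filterMap
    (fun i => if xs.getD i "" = "B" then some ((i : Int), (extEnd xs (i + 1) : Int)) else none)

def find_boundry_alt (labels : List (List String)) : List (List (Int × Int)) :=
  labels.map findB_inner

-- ===== PRECONDITION & SPEC =====
def Spec_find_boundry (labels : List (List String)) (out : List (List (Int × Int))) : Prop := out = find_boundry_alt labels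
instance (labels : List (List String)) (out : List (List (Int × Int))) : Decidable (Spec_find_boundry labels out) := by unfold Spec_find_boundry; infer_instance

-- ===== CLAIM (what is proved, stated in full; the proofs are below) =====
def Claim_equal_find_boundry : Prop := ∀ (labels : List (List String)), Dom_find_boundry labels → Spec_find_boundry labels (find_boundry labels)

-- ===== LEMMAS AND PROOFS =====

-- abbreviations used only by the proofs
def stepA (xs : List String) (st : Bool × List Int × List Int) (idx : Nat) :
    Bool × List Int × List Int :=
  let (flag, start, end_) := st
  if xs.getD idx "" = "B" then
    (true, start ++ [(idx : Int)], if flag then end_ ++ [(idx : Int)] else end_)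
  else if flag ∧ xs.getD idx "" ≠ "I" then
    (false, start, end_ ++ [(idx : Int)])
  else st

def bsOf (xs : List String) (k : Nat) : List Nat :=
  (List.range k).filter (fun i => xs.getD i "" = "B")

-- the while loop stops exactly at the first non-'I' (or at the end)
theorem extEnd_eq_of (xs : List String) (j k : Nat) (hjk : j ≤ k) (hkn : k ≤ xs.length)
    (hI : ∀ m, j ≤ m → m < k → xs.getD m "" = "I")
    (hk : ¬ (k < xs.length ∧ xs.getD k "" = "I")) : extEnd xs j = k := by
  obtain ⟨d, rfl⟩ : ∃ d, k = j + d := ⟨k - j, by omega⟩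
  clear hjk
  induction d generalizing j with
  | zero => rw [extEnd, dif_neg (by simpa using hk)]; omega
  | succ d ih =>
    have hjlt : j < xs.length := by omega
    have hjI : xs.getD j "" = "I" := hI j le_rfl (by omega)
    rw [extEnd, dif_pos ⟨hjlt, hjI⟩]
    have := ih (j + 1) (by omega) (fun m hm hm' => hI m (by omega) (by omega))
      (by simpa [Nat.add_assoc, Nat.add_comm 1 d] using hk)
    simpa [Nat.add_assoc, Nat.add_comm 1 d] using this

theorem bsOf_succ (xs : List String) (k : Nat) :
    bsOf xs (k + 1) = bsOf xs k ++ (if xs.getD k "" = "B" then [k] else []) := by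
  simp only [bsOf, List.range_succ, List.filter_append, List.filter_cons, List.filter_nil]
  split <;> simp_all

theorem mem_bsOf_lt (xs : List String) (k i : Nat) (h : i ∈ bsOf xs k) : i < k := by
  simp only [bsOf, List.mem_filter, List.mem_range] at h
  exact h.1

-- the invariant of A's fold
theorem invA (xs : List String) (k : Nat) (hk : k ≤ xs.length) :
    ∃ flag endL,
      (List.range k).foldl (stepA xs) (false, [], []) =
        (flag, (bsOf xs k).map (fun (i : Nat) => (i : Int)), endL) ∧
      (if flag then
        ∃ l bsI, bsOf xs k = bsI ++ [l] ∧
          endL = bsI.map (fun i => (extEnd xs (i + 1) : Int)) ∧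
          (∀ m, l < m → m < k → xs.getD m "" = "I")
       else endL = (bsOf xs k).map (fun i => (extEnd xs (i + 1) : Int))) := by
  induction k with
  | zero => exact ⟨false, [], by simp [bsOf], by simp [bsOf]⟩
  | succ k ih =>
    obtain ⟨flag, endL, heq, hinv⟩ := ih (by omega)
    rw [List.range_succ, List.foldl_append, List.foldl_cons, List.foldl_nil, heq]
    by_cases hB : xs.getD k "" = "B"
    · -- a 'B' at k: open a new span (closing the previous one if open)
      have hbs : bsOf xs (k + 1) = bsOf xs k ++ [k] := by rw [bsOf_succ, if_pos hB]
      refine ⟨true, if flag then endL ++ [(k : Int)] else endL, ?_, ?_⟩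
      · simp only [stepA, if_pos hB, hbs]
        simp
      simp only [if_true]
      refine ⟨k, bsOf xs k, hbs, ?_, by omega⟩
      cases flag with
      | false =>
        simp only [if_neg Bool.false_ne_true] at hinv ⊢
        exact hinv
      | true =>
        obtain ⟨l, bsI, hbsk, hend, hIv⟩ := if_pos rfl ▸ hinv
        have hlk : l < k := mem_bsOf_lt xs k l (by simp [hbsk])
        have hEl : extEnd xs (l + 1) = k :=
          extEnd_eq_of xs (l + 1) k (by omega) (by omega)
            (fun m hm hm' => hIv m (by omega) hm')
            (by rintro ⟨-, hI⟩; rw [hB] at hI; exact absurd hI (by decide))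
        simp [hbsk, hend, hEl]
    · have hbs0 : bsOf xs (k + 1) = bsOf xs k := by rw [bsOf_succ, if_neg hB]; simp
      by_cases hCl : flag = true ∧ ¬ xs.getD k "" = "I"
      · -- a non-'B' non-'I' at k while a span is open: close it
        obtain ⟨rfl, hnI⟩ := hCl
        obtain ⟨l, bsI, hbsk, hend, hIv⟩ := if_pos rfl ▸ hinv
        have hlk : l < k := mem_bsOf_lt xs k l (by simp [hbsk])
        have hEl : extEnd xs (l + 1) = k :=
          extEnd_eq_of xs (l + 1) k (by omega) (by omega)
            (fun m hm hm' => hIv m (by omega) hm')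
            (by rintro ⟨-, hI⟩; exact hnI hI)
        refine ⟨false, endL ++ [(k : Int)], ?_, ?_⟩
        · have hc2 : True ∧ xs.getD k "" ≠ "I" := ⟨trivial, hnI⟩
          simp only [stepA, if_neg hB]
          rw [if_pos hc2, hbs0]
        simp only [if_neg Bool.false_ne_true, hbs0, hbsk, List.map_append, List.map_cons,
          List.map_nil, hend, hEl]
      · -- otherwise nothing changes
        refine ⟨flag, endL, ?_, ?_⟩
        · simp only [stepA, if_neg hB, if_neg hCl, hbs0]
        cases flag with
        | false =>
          simpa only [if_neg Bool.false_ne_true, hbs0] using hinv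
        | true =>
          have hkI : xs.getD k "" = "I" := by
            by_contra h; exact hCl ⟨rfl, h⟩
          obtain ⟨l, bsI, hbsk, hend, hIv⟩ := if_pos rfl ▸ hinv
          simp only [if_true, hbs0]
          refine ⟨l, bsI, hbsk, hend, fun m hm hm' => ?_⟩
          rcases Nat.lt_succ_iff_lt_or_eq.mp hm' with h | rfl
          · exact hIv m hm h
          · exact hkI

theorem filterMap_if_eq_map_filter (xs : List String) (f : Nat → Int × Int) (l : List Nat) :
    l.filterMap (fun i => if xs.getD i "" = "B" then some (f i) else none) =
      (l.filter (fun i => xs.getD i "" = "B")).map f := by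
  induction l with
  | nil => rfl
  | cons a l ih =>
    simp only [List.filterMap_cons, List.filter_cons]
    by_cases h : xs.getD a "" = "B"
    · rw [if_pos h, ih, if_pos (decide_eq_true h)]
      rfl
    · rw [if_neg h, ih, if_neg (fun hc => h (of_decide_eq_true hc))]

theorem inner_eq (xs : List String) : findA_inner xs = findB_inner xs := by
  obtain ⟨flag, endL, heq, hinv⟩ := invA xs xs.length le_rfl
  have hA : findA_inner xs =
      (((List.range xs.length).foldl (stepA xs) (false, [], [])).2.1).zip
        (if ((List.range xs.length).foldl (stepA xs) (false, [], [])).1 then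
          ((List.range xs.length).foldl (stepA xs) (false, [], [])).2.2 ++ [(xs.length : Int)]
         else ((List.range xs.length).foldl (stepA xs) (false, [], [])).2.2) := rfl
  have hBeq : findB_inner xs =
      (bsOf xs xs.length).map (fun (i : Nat) => ((i : Int), (extEnd xs (i + 1) : Int))) := by
    rw [findB_inner, filterMap_if_eq_map_filter]
    rfl
  rw [hA, heq]
  have hend2 : (if flag then endL ++ [(xs.length : Int)] else endL) =
      (bsOf xs xs.length).map (fun i => (extEnd xs (i + 1) : Int)) := by
    cases flag with
    | false => simpa only [if_neg Bool.false_ne_true] using hinv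
    | true =>
      obtain ⟨l, bsI, hbs, hend, hIv⟩ := if_pos rfl ▸ hinv
      have hlk : l < xs.length := mem_bsOf_lt xs xs.length l (by simp [hbs])
      have hEl : extEnd xs (l + 1) = xs.length :=
        extEnd_eq_of xs (l + 1) xs.length (by omega) le_rfl
          (fun m hm hm' => hIv m (by omega) hm') (by omega)
      simp [hbs, hend, hEl]
  simp only [hend2, hBeq, List.zip_map']

theorem foldlA_acc (ls : List (List String)) (acc : List (List (Int × Int))) :
    ls.foldl (fun pairs label => pairs ++ [findA_inner label]) acc =
      acc ++ ls.map findA_inner := by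
  induction ls generalizing acc with
  | nil => simp
  | cons l ls ih => simp [ih]

-- ===== VERDICT (by name: the statement is the Claim_ definition above) =====
theorem find_boundry_spec : Claim_equal_find_boundry := by
  intro labels _
  unfold Spec_find_boundry find_boundry find_boundry_alt
  rw [foldlA_acc]
  simp [inner_eq]
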